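-- pv_equiv track=rewrite | github.com/SitNickOff/algorithms-sirius | lesson_04/extra_letter.py | extra_letter
-- ===== SOURCE A (Python) =====
-- def extra_letter(s, t):
--     i = 0
--     for i in s:
--
--         if (i in t) == False :
--             return i
--         else:
--             t = t[:t.find(i)] + t[t.find(i) + 1:]
--     return t
-- ===== SOURCE B (Python) =====
-- def extra_letter(s, t):
--     counts = {}
--     for c in t:
--         counts[c] = counts.get(c, 0) + 1
--     for c in s:
--         if counts.get(c, 0) == 0:
--             return c
--         counts[c] = counts[c] - 1
--     remove = {}
--     for c in s:
--         remove[c] = remove.get(c, 0) + 1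
--     kept = []
--     for c in t:
--         if remove.get(c, 0) > 0:
--             remove[c] = remove[c] - 1
--         else:
--             kept.append(c)
--     return ''.join(kept)
-- ===== Notes on version B (the rewrite author's own statement) =====
-- stated objective: faster
-- what changed: Replaced A's repeated substring-search-and-slice rebuilding of t (a find plus two slices per character of s) with a counting algorithm: build a character-count dict of t, scan s decrementing counts (early return on an exhausted count), and if no mismatch reconstruct the leftover in one pass over t skipping the first count-of-s occurrences of each character.
import Mathlib
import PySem

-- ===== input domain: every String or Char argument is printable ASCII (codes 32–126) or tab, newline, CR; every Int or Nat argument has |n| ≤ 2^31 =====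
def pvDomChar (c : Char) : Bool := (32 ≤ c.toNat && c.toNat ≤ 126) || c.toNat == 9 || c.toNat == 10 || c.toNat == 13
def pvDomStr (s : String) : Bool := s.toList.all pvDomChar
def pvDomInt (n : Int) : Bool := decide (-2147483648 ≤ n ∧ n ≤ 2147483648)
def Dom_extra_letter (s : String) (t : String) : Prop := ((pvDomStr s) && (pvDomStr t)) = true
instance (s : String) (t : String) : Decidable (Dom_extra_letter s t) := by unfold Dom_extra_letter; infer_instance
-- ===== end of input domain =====

-- B replaces A's per-character substring search and slice-rebuilding of t with a
-- character-count dict (one counting pass, one decrementing scan of s, one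
-- reconstruction pass over t); same return value everywhere.

-- ===== PORT A =====
-- A's loop: for each char c of s, return c if not a substring of t, else cut the
-- first occurrence of c out of t via t[:t.find(c)] + t[t.find(c)+1:].
def extra_letter_loopA : List Char → List Char → List Char
  | [], t => t
  | c :: rest, t =>
    if PySem.Chars.isIn [c] t = false then [c]
    else extra_letter_loopA rest
      (PySem.List.slice t none (some (PySem.Chars.find t [c])) ++
       PySem.List.slice t (some (PySem.Chars.find t [c] + 1)) none)

def extra_letter (s : String) (t : String) : String :=
  String.ofList (extra_letter_loopA s.toList t.toList)

-- ===== PORT B =====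
-- first pass over s: early-return char when its count in t is exhausted
def extra_letter_altPass1 : List Char → PySem.Dict Char Int → Option Char
  | [], _ => none
  | c :: rest, d =>
    if d.getD c 0 == 0 then some c
    else extra_letter_altPass1 rest (PySem.Dict.modify d c 0 (· - 1))

-- reconstruction pass over t: skip a char while its count from s is positive
def extra_letter_altPass2 (t : List Char) (remove : PySem.Dict Char Int) : List Char :=
  (t.foldl (fun st c =>
      if st.1.getD c 0 > 0 then (PySem.Dict.modify st.1 c 0 (· - 1), st.2)
      else (st.1, st.2 ++ [c]))
    (remove, ([] : List Char))).2

def extra_letter_alt (s : String) (t : String) : String :=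
  match extra_letter_altPass1 s.toList (PySem.Dict.counter t.toList) with
  | some c => String.ofList [c]
  | none => String.ofList (extra_letter_altPass2 t.toList (PySem.Dict.counter s.toList))

-- ===== PRECONDITION & SPEC =====
def Spec_extra_letter (s : String) (t : String) (out : String) : Prop := out = extra_letter_alt s t
instance (s : String) (t : String) (out : String) : Decidable (Spec_extra_letter s t out) := by unfold Spec_extra_letter; infer_instance

-- ===== CLAIM (what is proved, stated in full; the proofs are below) =====
def Claim_equal_extra_letter : Prop := ∀ (s : String) (t : String), Dom_extra_letter s t → Spec_extra_letter s t (extra_letter s t)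

-- ===== LEMMAS AND PROOFS =====

-- A's loop with the slicing abstracted to List.erase
def pvSpecLoop : List Char → List Char → List Char
  | [], t => t
  | c :: rest, t => if c ∈ t then pvSpecLoop rest (t.erase c) else [c]

-- keep t's chars, skipping the first (m c) occurrences of each char c
def pvKeep : List Char → (Char → Nat) → List Char
  | [], _ => []
  | c :: t, m =>
    if m c > 0 then pvKeep t (fun x => if x = c then m c - 1 else m x)
    else c :: pvKeep t m

theorem pv_isIn_singleton (c : Char) (t : List Char) :
    PySem.Chars.isIn [c] t = true ↔ c ∈ t := by
  rw [PySem.Chars.isIn_iff_infix]; exact List.singleton_infix_iff c t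

theorem pv_find_go_singleton (c : Char) (t : List Char) (k : Nat) (h : c ∈ t) :
    PySem.Chars.find.go [c] t k = ((k + t.idxOf c : Nat) : Int) := by
  induction t generalizing k with
  | nil => cases h
  | cons a t ih =>
    show (if List.isPrefixOf [c] (a :: t) then (k : Int) else PySem.Chars.find.go [c] t (k+1)) = _
    by_cases hc : c = a
    · subst hc
      simp [List.isPrefixOf, List.idxOf_cons_self]
    · have hmem : c ∈ t := by
        rcases List.mem_cons.mp h with h' | h'
        · exact absurd h' hc
        · exact h'
      have : List.isPrefixOf [c] (a :: t) = false := by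
        simp [List.isPrefixOf]
        exact fun hba => hc hba
      rw [this]
      simp only [Bool.false_eq_true, if_false, ih (k+1) hmem]
      rw [List.idxOf_cons_ne _ (by exact Ne.symm hc)]
      push_cast; ring

theorem pv_slice_erase (c : Char) (t : List Char) (h : c ∈ t) :
    PySem.List.slice t none (some (PySem.Chars.find t [c])) ++
      PySem.List.slice t (some (PySem.Chars.find t [c] + 1)) none = t.erase c := by
  have hf : PySem.Chars.find t [c] = (t.idxOf c : Int) := by
    show PySem.Chars.find.go [c] t 0 = _
    simpa using pv_find_go_singleton c t 0 h
  rw [hf]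
  have h1 : (t.idxOf c : Int) + 1 = ((t.idxOf c + 1 : Nat) : Int) := by push_cast; ring
  rw [h1, PySem.List.slice_to_natCast, PySem.List.slice_from_natCast,
    List.erase_eq_eraseIdx_of_idxOf rfl, List.eraseIdx_eq_take_drop_succ]

theorem pv_loopA_eq_spec (s t : List Char) :
    extra_letter_loopA s t = pvSpecLoop s t := by
  induction s generalizing t with
  | nil => rfl
  | cons c rest ih =>
    simp only [extra_letter_loopA, pvSpecLoop]
    by_cases h : c ∈ t
    · rw [if_neg (by simp [pv_isIn_singleton c t |>.mpr h]), if_pos h,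
        pv_slice_erase c t h, ih]
    · rw [if_pos (by
        have := (pv_isIn_singleton c t).not.mpr h
        simpa using eq_false_of_ne_true (fun hh => this hh)), if_neg h]

theorem pv_keep_zero (t : List Char) : pvKeep t (fun _ => 0) = t := by
  induction t with
  | nil => rfl
  | cons a t ih => simp [pvKeep, ih]

theorem pv_keep_congr (t : List Char) (m m' : Char → Nat) (h : ∀ x, m x = m' x) :
    pvKeep t m = pvKeep t m' := by
  have : m = m' := funext h
  rw [this]

theorem pv_keep_bump (c : Char) (t : List Char) (m : Char → Nat) (h : c ∈ t) :
    pvKeep (t.erase c) m = pvKeep t (fun x => if x = c then m x + 1 else m x) := by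
  induction t generalizing m with
  | nil => cases h
  | cons a t ih =>
    by_cases hac : a = c
    · subst hac
      rw [List.erase_cons_head]
      have e1 : pvKeep (a :: t) (fun x => if x = a then m x + 1 else m x)
          = pvKeep t (fun x => if x = a then m a else m x) := by
        simp only [pvKeep]
        rw [if_pos (by simp)]
        exact pv_keep_congr t _ _ (fun x => by by_cases hx : x = a <;> simp [hx])
      rw [e1]
      exact (pv_keep_congr t _ _ (fun x => by by_cases hx : x = a <;> simp [hx])).symm
    · have hmem : c ∈ t := by
        rcases List.mem_cons.mp h with h' | h'
        · exact absurd h'.symm hac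
        · exact h'
      rw [List.erase_cons_tail (by simp [hac])]
      simp only [pvKeep]
      have hma : (if a = c then m a + 1 else m a) = m a := by simp [hac]
      rw [hma]
      by_cases hp : m a > 0
      · rw [if_pos hp, if_pos hp, ih _ hmem]
        exact pv_keep_congr t _ _ (fun x => by
          by_cases hx : x = c <;> by_cases hy : x = a <;>
            simp [hx, hy] at * <;> simp_all)
      · rw [if_neg hp, if_neg hp, ih _ hmem]

-- master lemma: A's abstract loop equals B's pass1 / leftover reconstruction
theorem pv_master (s t : List Char) (d : PySem.Dict Char Int)
    (hd : ∀ x, d.getD x 0 = (List.count x t : Int)) :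
    pvSpecLoop s t =
      (match extra_letter_altPass1 s d with
       | some c => [c]
       | none => pvKeep t (fun x => List.count x s)) := by
  induction s generalizing t d with
  | nil =>
    simp only [extra_letter_altPass1, pvSpecLoop]
    rw [pv_keep_congr t _ (fun _ => 0) (fun x => by simp), pv_keep_zero]
  | cons c rest ih =>
    simp only [extra_letter_altPass1, pvSpecLoop]
    by_cases h : c ∈ t
    · have hcnt : List.count c t ≠ 0 := by
        simpa [List.count_eq_zero] using h
      have htest : (d.getD c 0 == 0) = false := by
        simp [hd c]; exact_mod_cast hcnt
      simp only [htest, Bool.false_eq_true, if_false, if_pos h]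
      have hd' : ∀ x, (PySem.Dict.modify d c 0 (· - 1)).getD x 0
          = (List.count x (t.erase c) : Int) := by
        intro x
        show ((d.insert c (d.getD c 0 - 1)).getD x 0) = _
        rw [PySem.Dict.getD_insert]
        by_cases hx : x = c
        · subst hx
          have h1 : 1 ≤ List.count x t := List.one_le_count_iff.mpr h
          rw [if_pos rfl, hd x, List.count_erase_self]
          omega
        · rw [if_neg hx, hd x, List.count_erase_of_ne hx]
      rw [ih (t.erase c) _ hd']
      cases hp : extra_letter_altPass1 rest (PySem.Dict.modify d c 0 (· - 1)) with
      | some c' => simp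
      | none =>
        simp only
        rw [pv_keep_bump c t (fun x => List.count x rest) h]
        exact pv_keep_congr t _ _ (fun x => by
          by_cases hx : x = c
          · simp [hx]
          · simp [hx, Ne.symm hx])
    · have hcnt : List.count c t = 0 := List.count_eq_zero.mpr h
      have htest : (d.getD c 0 == 0) = true := by simp [hd c, hcnt]
      rw [htest, if_neg h]
      simp

-- B's pass2 fold computes pvKeep
theorem pv_pass2_eq_keep (t : List Char) (d : PySem.Dict Char Int) (acc : List Char)
    (m : Char → Nat) (hd : ∀ x, d.getD x 0 = (m x : Int)) :
    (t.foldl (fun st c =>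
        if st.1.getD c 0 > 0 then (PySem.Dict.modify st.1 c 0 (· - 1), st.2)
        else (st.1, st.2 ++ [c])) (d, acc)).2 = acc ++ pvKeep t m := by
  induction t generalizing d m acc with
  | nil => simp [pvKeep]
  | cons c t ih =>
    simp only [List.foldl_cons, pvKeep]
    by_cases hp : m c > 0
    · have : d.getD c 0 > 0 := by rw [hd c]; exact_mod_cast hp
      rw [if_pos this, if_pos hp]
      exact ih _ acc _ (fun x => by
        show ((d.insert c (d.getD c 0 - 1)).getD x 0) = _
        rw [PySem.Dict.getD_insert]
        by_cases hx : x = c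
        · subst hx; rw [if_pos rfl, hd x, if_pos rfl]; omega
        · rw [if_neg hx, hd x, if_neg hx])
    · have hz : m c = 0 := Nat.eq_zero_of_not_pos hp
      have : ¬ d.getD c 0 > 0 := by rw [hd c, hz]; norm_num
      rw [if_neg this, if_neg hp, ih _ (acc ++ [c]) m hd]
      simp

-- ===== VERDICT (by name: the statement is the Claim_ definition above) =====
theorem extra_letter_spec : Claim_equal_extra_letter := by
  intro s t _
  show extra_letter s t = extra_letter_alt s t
  unfold extra_letter extra_letter_alt
  rw [pv_loopA_eq_spec,
    pv_master s.toList t.toList (PySem.Dict.counter t.toList)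
      (fun x => PySem.Dict.getD_counter t.toList x)]
  cases hp : extra_letter_altPass1 s.toList (PySem.Dict.counter t.toList) with
  | some c => simp
  | none =>
    simp only
    unfold extra_letter_altPass2
    rw [pv_pass2_eq_keep t.toList _ [] (fun x => List.count x s.toList)
      (fun x => PySem.Dict.getD_counter s.toList x)]
    simp
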